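-- pv_equiv track=rewrite | github.com/uio-bmi/track_rand | lib/hb/quick/webtools/restricted/ScreenTwoTrackCollectionsAgainstEachOther2LevelDepthCutCube.py | calculateTextToCube
-- ===== SOURCE A (Python) =====
-- def calculateTextToCube(folderValue1Unique, divNum):
--     divFolderValue1Unique=""
--     i=0
--     for cutFv1U in folderValue1Unique:
--         if i < 4:
--             divFolderValue1Unique+="<div class='face"+str(divNum) + "'>"+ str(cutFv1U[:12]).replace(" ",'&nbsp;') + "..." + "</div>"
--             if len(folderValue1Unique)<4:
--                 if i != len(folderValue1Unique)-1:
--                     divFolderValue1Unique+="<div class='line"+str(divNum) + "'></div>"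
--             else:
--                 if i != 3:
--                     divFolderValue1Unique+="<div class='line"+str(divNum) + "'></div>"
--         i+=1
--     return str(divFolderValue1Unique)
-- ===== SOURCE B (Python) =====
-- def calculateTextToCube(folderValue1Unique, divNum):
--     # Positional construction: the output is a sequence of 2k-1 pieces
--     # (k = number of rendered items, capped at 4): even positions hold face
--     # divs (item j//2), odd positions hold the line div. No per-item
--     # separator branching at all.
--     k = min(len(folderValue1Unique), 4)
--     pieces = []
--     for j in range(2 * k - 1):
--         if j % 2:
--             pieces.append("<div class='line" + str(divNum) + "'></div>")
--         else:
--             item = folderValue1Unique[j // 2]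
--             pieces.append("<div class='face" + str(divNum) + "'>"
--                           + str(item[:12]).replace(" ", '&nbsp;') + "..." + "</div>")
--     return "".join(pieces)
-- ===== Notes on version B (the rewrite author's own statement) =====
-- stated objective: alternative
-- what changed: Instead of A's accumulator loop over every item with nested two-case separator branching (len<4 vs len>=4, i vs len-1 vs 3), B constructs the output positionally: it iterates j over range(2*k-1) with k=min(len,4), emitting a line div at odd j and the face of item j//2 at even j, then joins the pieces.
import Mathlib
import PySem

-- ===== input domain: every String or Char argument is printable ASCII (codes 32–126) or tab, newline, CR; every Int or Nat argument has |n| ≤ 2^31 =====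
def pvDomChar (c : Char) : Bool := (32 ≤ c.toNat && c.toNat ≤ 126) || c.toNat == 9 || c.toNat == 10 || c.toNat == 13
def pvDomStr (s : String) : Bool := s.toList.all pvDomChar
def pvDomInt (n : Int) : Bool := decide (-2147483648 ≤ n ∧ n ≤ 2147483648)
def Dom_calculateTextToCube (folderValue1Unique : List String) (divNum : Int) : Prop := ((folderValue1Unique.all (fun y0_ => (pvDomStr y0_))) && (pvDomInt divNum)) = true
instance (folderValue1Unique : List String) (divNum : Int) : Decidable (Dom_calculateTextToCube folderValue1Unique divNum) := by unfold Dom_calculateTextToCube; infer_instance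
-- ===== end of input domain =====

-- B builds the output positionally: 2k-1 pieces indexed by j, odd j = line div, even j = face of item j//2; objective: simpler.

-- shared text builders (identical expressions in both Pythons):
-- "<div class='face"+str(divNum)+"'>"+str(s[:12]).replace(" ",'&nbsp;')+"..."+"</div>"
def pvFace (divNum : Int) (s : String) : String :=
  "<div class='face" ++ PySem.Int.toStr divNum ++ "'>"
    ++ PySem.Str.replace (PySem.Str.slice s none (some 12)) " " "&nbsp;"
    ++ "..." ++ "</div>"

-- "<div class='line"+str(divNum)+"'></div>"
def pvLine (divNum : Int) : String :=
  "<div class='line" ++ PySem.Int.toStr divNum ++ "'></div>"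

-- ===== PORT A =====
-- A's for-loop with counter i, accumulating into divFolderValue1Unique; n = len(folderValue1Unique)
def pvGoA (divNum : Int) (n : Nat) : List String → Nat → String → String
  | [], _, acc => acc
  | cutFv1U :: rest, i, acc =>
    let acc' :=
      if i < 4 then
        let acc1 := acc ++ pvFace divNum cutFv1U
        if n < 4 then
          (if i ≠ n - 1 then acc1 ++ pvLine divNum else acc1)
        else
          (if i ≠ 3 then acc1 ++ pvLine divNum else acc1)
      else acc
    pvGoA divNum n rest (i + 1) acc'

def calculateTextToCube (folderValue1Unique : List String) (divNum : Int) : String :=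
  pvGoA divNum folderValue1Unique.length folderValue1Unique 0 ""

-- ===== PORT B =====
-- k = min(len, 4); for j in range(2*k-1): odd j -> line div, even j -> face of item j//2; "".join
def calculateTextToCube_alt (folderValue1Unique : List String) (divNum : Int) : String :=
  let k : Int := min (folderValue1Unique.length : Int) 4
  let pieces := (PySem.List.pyRange 0 (2 * k - 1) 1).foldl
    (fun ps j =>
      ps ++ [if PySem.Int.mod j 2 ≠ 0 then pvLine divNum
             else pvFace divNum (PySem.List.pyGetD folderValue1Unique (PySem.Int.floordiv j 2) "")])
    []
  PySem.Str.join "" pieces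

-- ===== PRECONDITION & SPEC =====
def Spec_calculateTextToCube (folderValue1Unique : List String) (divNum : Int) (out : String) : Prop := out = calculateTextToCube_alt folderValue1Unique divNum
instance (folderValue1Unique : List String) (divNum : Int) (out : String) : Decidable (Spec_calculateTextToCube folderValue1Unique divNum out) := by unfold Spec_calculateTextToCube; infer_instance

-- ===== CLAIM =====
def Claim_equal_calculateTextToCube : Prop := ∀ (folderValue1Unique : List String) (divNum : Int), Dom_calculateTextToCube folderValue1Unique divNum → Spec_calculateTextToCube folderValue1Unique divNum (calculateTextToCube folderValue1Unique divNum)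

-- ===== LEMMAS AND PROOFS =====

-- once i ≥ 4 the rest of A's loop leaves the accumulator untouched
theorem pvGoA_high (divNum : Int) (n : Nat) (xs : List String) :
    ∀ (i : Nat) (acc : String), 4 ≤ i → pvGoA divNum n xs i acc = acc := by
  induction xs with
  | nil => intro i acc _; rfl
  | cons c rest ih =>
      intro i acc hi
      have h4 : ¬ i < 4 := by omega
      simp [pvGoA, h4]
      exact ih (i + 1) acc (by omega)

set_option maxHeartbeats 1000000 in
theorem join_cons (x : String) (xs : List String) :
    PySem.Str.join "" (x :: xs) = x ++ PySem.Str.join "" xs := by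
  apply String.ext
  cases xs <;> simp [pysem, PySem.Str.join, PySem.Chars.join, List.intercalate]

theorem join_nil : PySem.Str.join "" ([] : List String) = "" := rfl

-- ===== VERDICT =====
theorem calculateTextToCube_spec : Claim_equal_calculateTextToCube := by
  intro xs divNum _
  unfold Spec_calculateTextToCube calculateTextToCube calculateTextToCube_alt
  match xs with
  | [] =>
      simp [pvGoA, PySem.List.pyRange, join_nil]
  | [a] =>
      simp only [List.length_cons, List.length_nil]
      norm_num
      have hr : PySem.List.pyRange 0 1 1 = [0] := by decide
      rw [hr]
      simp [pvGoA, join_cons, join_nil, PySem.List.pyGetD_ofNat']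
  | [a, b] =>
      simp only [List.length_cons, List.length_nil]
      norm_num
      have hr : PySem.List.pyRange 0 3 1 = [0, 1, 2] := by decide
      rw [hr]
      simp [pvGoA, join_cons, join_nil, PySem.List.pyGetD_ofNat', String.append_assoc]
  | [a, b, c] =>
      simp only [List.length_cons, List.length_nil]
      norm_num
      have hr : PySem.List.pyRange 0 5 1 = [0, 1, 2, 3, 4] := by decide
      rw [hr]
      simp [pvGoA, join_cons, join_nil, PySem.List.pyGetD_ofNat', String.append_assoc]
  | a :: b :: c :: d :: rest =>
      simp only [List.length_cons]
      have hk : min (((rest.length + 1 + 1 + 1 + 1 : Nat) : Int)) 4 = 4 := by omega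
      rw [hk]
      have hn : ¬ ((rest.length + 1 + 1 + 1 + 1) < 4) := by omega
      simp only [pvGoA, hn]
      norm_num
      rw [pvGoA_high divNum _ rest 4 _ (by omega)]
      have hr : PySem.List.pyRange 0 7 1 = [0, 1, 2, 3, 4, 5, 6] := by decide
      rw [hr]
      simp [join_cons, join_nil, PySem.List.pyGetD_ofNat', String.append_assoc]
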